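-- pv_equiv track=rewrite | github.com/MLYTC1/CodeWars | Valid Spacing.py | valid_spacing
-- ===== SOURCE A (Python) =====
-- def valid_spacing(s):
--     c = 0
--     for i in s:
--         if i == " ":
--             c += 1
--         else:
--             break
--     for i in s[::-1]:
--         if i == " ":
--             c += 1
--         else:
--             break
--     return c == 0 and s.count("  ") == 0
-- ===== SOURCE B (Python) =====
-- def valid_spacing(s):
--     prev = " "
--     for ch in s:
--         if prev == " " and ch == " ":
--             return False
--         prev = ch
--     return not s or prev != " "
-- ===== Notes on version B (the rewrite author's own statement) =====
-- stated objective: alternative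
-- what changed: Replaces A's two end-scanning loops plus a substring count with a single left-to-right state machine that carries the previous character (sentinel space) and rejects on the first adjacent space pair or a trailing space.
import Mathlib
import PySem

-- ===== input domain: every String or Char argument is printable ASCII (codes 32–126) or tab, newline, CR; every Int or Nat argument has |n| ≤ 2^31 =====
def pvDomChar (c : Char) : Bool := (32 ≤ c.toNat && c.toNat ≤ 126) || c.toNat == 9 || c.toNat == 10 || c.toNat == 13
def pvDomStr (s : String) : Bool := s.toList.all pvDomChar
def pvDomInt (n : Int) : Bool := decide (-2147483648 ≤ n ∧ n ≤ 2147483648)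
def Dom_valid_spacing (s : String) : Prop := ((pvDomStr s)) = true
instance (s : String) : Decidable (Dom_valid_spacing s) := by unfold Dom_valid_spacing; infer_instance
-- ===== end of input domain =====

-- B replaces A's two end-scanning loops plus a substring count by a single left-to-right state
-- machine carrying the previous character (sentinel space): alternative decomposition, same cost.


-- ===== PORT A =====
-- A's 'for i in …: if i == " ": c += 1 else: break' loop, starting from counter c
def vsLead : List Char → Int → Int
  | [], c => c
  | i :: t, c => if i == ' ' then vsLead t (c + 1) else c

def valid_spacing (s : String) : Bool :=
  let c := vsLead s.toList 0
  -- s[::-1]: slice? with step -1 never raises (PySem.List.slice?_none_none_neg_one); getD [] is unreachable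
  let c := vsLead ((PySem.Chars.slice? s.toList none none (-1)).getD []) c
  decide (c = 0) && decide (PySem.Str.count s "  " = 0)

-- ===== PORT B =====
-- B's loop: walk the string once carrying the previous character; 'none' is B's early 'return False'
def vsScan : Char → List Char → Option Char
  | prev, [] => some prev
  | prev, ch :: t => if prev == ' ' && ch == ' ' then none else vsScan ch t

def valid_spacing_alt (s : String) : Bool :=
  match vsScan ' ' s.toList with
  | none => false
  | some prev => decide (s.toList = []) || !(prev == ' ')

-- ===== PRECONDITION & SPEC =====
def Spec_valid_spacing (s : String) (out : Bool) : Prop := out = valid_spacing_alt s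
instance (s : String) (out : Bool) : Decidable (Spec_valid_spacing s out) := by unfold Spec_valid_spacing; infer_instance

-- ===== CLAIM (what is proved, stated in full; the proofs are below) =====
def Claim_equal_valid_spacing : Prop := ∀ (s : String), Dom_valid_spacing s → Spec_valid_spacing s (valid_spacing s)

-- ===== LEMMAS AND PROOFS =====

theorem vsLead_shift (l : List Char) (c : Int) : vsLead l c = c + vsLead l 0 := by
  induction l generalizing c with
  | nil => simp [vsLead]
  | cons h t ih =>
    simp only [vsLead]
    split_ifs with hs
    · rw [ih (c + 1), ih (0 + 1)]; ring
    · simp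

theorem vsLead_nonneg (l : List Char) : 0 ≤ vsLead l 0 := by
  induction l with
  | nil => simp [vsLead]
  | cons h t ih =>
    simp only [vsLead]
    split_ifs with hs
    · rw [vsLead_shift]; omega
    · exact le_refl 0

theorem vsLead_zero_iff (l : List Char) : vsLead l 0 = 0 ↔ ¬ [' '] <+: l := by
  cases l with
  | nil => simp [vsLead]
  | cons h t =>
    simp only [vsLead]
    split_ifs with hs
    · rw [vsLead_shift]
      have hnn := vsLead_nonneg t
      have hpre : [' '] <+: h :: t := ⟨t, by simp [(by simpa using hs : h = ' ')]⟩
      constructor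
      · intro h0; omega
      · intro hnp; exact (hnp hpre).elim
    · have hne : h ≠ ' ' := by simpa using hs
      constructor
      · intro _ hp
        rcases List.cons_prefix_cons.mp hp with ⟨he, _⟩
        exact hne he.symm
      · intro _; rfl

theorem count_go_ge (sub : List Char) (fuel : Nat) (l : List Char) (acc : Nat) :
    acc ≤ PySem.Chars.count.go sub fuel l acc := by
  induction fuel generalizing l acc with
  | zero => simp [PySem.Chars.count.go]
  | succ n ih =>
    cases l with
    | nil => simp [PySem.Chars.count.go]
    | cons h t =>
      simp only [PySem.Chars.count.go]
      split_ifs with hp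
      · exact le_trans (by omega) (ih _ _)
      · exact ih _ _

theorem count_go_zero_iff (sub : List Char) (hsub : sub ≠ []) (fuel : Nat) (l : List Char)
    (acc : Nat) (hf : l.length ≤ fuel) :
    (PySem.Chars.count.go sub fuel l acc = acc ↔ ∀ j, ¬ sub <+: l.drop j) := by
  induction fuel generalizing l acc with
  | zero =>
    have : l = [] := List.eq_nil_of_length_eq_zero (by omega)
    subst this
    simp [PySem.Chars.count.go, List.prefix_nil, hsub]
  | succ n ih =>
    cases l with
    | nil => simp [PySem.Chars.count.go, List.prefix_nil, hsub]
    | cons h t =>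
      simp only [PySem.Chars.count.go]
      split_ifs with hp
      · have hge := count_go_ge sub n (List.drop sub.length (h :: t)) (acc + 1)
        constructor
        · intro h0; omega
        · intro hnp
          have h0 := hnp 0
          simp only [List.drop_zero] at h0
          exact (h0 (List.isPrefixOf_iff_prefix.mp hp)).elim
      · have ht : t.length ≤ n := by simpa using hf
        rw [ih t acc ht]
        constructor
        · intro hall j
          cases j with
          | zero =>
            simp only [List.drop_zero]
            intro hpre
            exact hp (List.isPrefixOf_iff_prefix.mpr hpre)
          | succ k => simpa using hall k
        · intro hall j
          simpa using hall (j + 1)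

theorem count_zero_iff (l sub : List Char) (hsub : sub ≠ []) :
    (PySem.Chars.count l sub = 0 ↔ ¬ sub <:+: l) := by
  rw [← PySem.Chars.isIn_iff_infix, ← PySem.Chars.exists_prefix_drop_iff_isIn]
  unfold PySem.Chars.count
  simp only [List.isEmpty_iff, hsub, if_false]
  rw [count_go_zero_iff sub hsub l.length l 0 le_rfl]
  push Not
  constructor
  · intro hall j hj; exact hall j hj
  · intro hall j hj; exact hall j hj

-- B-side: the scan aborts exactly on a leading space (against the sentinel) or an adjacent pair
theorem vsScan_none_iff (l : List Char) (prev : Char) :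
    vsScan prev l = none ↔ (prev = ' ' ∧ [' '] <+: l) ∨ [' ', ' '] <:+: l := by
  induction l generalizing prev with
  | nil => simp [vsScan]
  | cons ch t ih =>
    simp only [vsScan]
    split_ifs with hs
    · simp only [Bool.and_eq_true, beq_iff_eq] at hs
      simp only [true_iff]
      exact Or.inl ⟨hs.1, ⟨t, by simp [hs.2]⟩⟩
    · simp only [Bool.and_eq_true, beq_iff_eq, not_and] at hs
      rw [ih]
      constructor
      · rintro (⟨hch, hpt⟩ | hinf)
        · rcases hpt with ⟨r, hr⟩
          exact Or.inr (List.IsPrefix.isInfix ⟨r, by simp [hch, ← hr]⟩)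
        · exact Or.inr (List.infix_cons hinf)
      · rintro (⟨hp, hpre⟩ | hinf)
        · rcases List.cons_prefix_cons.mp hpre with ⟨he, _⟩
          exact absurd he.symm (hs hp)
        · rcases (List.infix_cons_iff.mp hinf) with hpre | hit
          · rcases List.cons_prefix_cons.mp hpre with ⟨he, ht⟩
            exact Or.inl ⟨he.symm, ht⟩
          · exact Or.inr hit

theorem vsScan_some_eq (l : List Char) (prev p : Char) (h : vsScan prev l = some p) :
    p = l.getLastD prev := by
  induction l generalizing prev with
  | nil => simpa [vsScan] using h.symm
  | cons ch t ih =>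
    simp only [vsScan] at h
    split_ifs at h with hs
    rw [ih ch h]
    cases t <;> simp [List.getLastD]

-- ===== VERDICT (by name: the statement is the Claim_ definition above) =====
theorem valid_spacing_spec : Claim_equal_valid_spacing := by
  intro s _
  unfold Spec_valid_spacing valid_spacing valid_spacing_alt
  simp only [PySem.Chars.slice?_eq_listSlice?, PySem.List.slice?_none_none_neg_one,
    Option.getD_some, PySem.Str.count_eq]
  rw [vsLead_shift]
  have h1 := vsLead_zero_iff s.toList
  have h2 := vsLead_zero_iff s.toList.reverse
  have n1 := vsLead_nonneg s.toList
  have n2 := vsLead_nonneg s.toList.reverse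
  have hc := count_zero_iff s.toList [' ', ' '] (by decide)
  have hrs : ([' '] <+: s.toList.reverse) ↔ ([' '] <:+ s.toList) := by
    simpa using List.reverse_prefix (l₁ := [' ']) (l₂ := s.toList)
  rcases hv : vsScan ' ' s.toList with _ | p
  · rcases (vsScan_none_iff s.toList ' ').mp hv with ⟨_, hpre⟩ | hinf
    · have hne : vsLead s.toList 0 ≠ 0 := fun h0 => (h1.mp h0) hpre
      have : ¬ (vsLead s.toList 0 + vsLead s.toList.reverse 0 = 0) := by omega
      simp [this]
    · have : ¬ (PySem.Chars.count s.toList [' ', ' '] = 0) := fun h0 => (hc.mp h0) hinf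
      simp [this]
  · have hno : ¬ ((' ' = ' ' ∧ [' '] <+: s.toList) ∨ [' ', ' '] <:+: s.toList) := by
      intro hx
      rw [← vsScan_none_iff s.toList ' '] at hx
      rw [hv] at hx
      exact absurd hx (by simp)
    push Not at hno
    obtain ⟨hnp, hni⟩ := hno
    have hz1 : vsLead s.toList 0 = 0 := h1.mpr (hnp rfl)
    have hcnt : PySem.Chars.count s.toList [' ', ' '] = 0 := hc.mpr hni
    have hp := vsScan_some_eq s.toList ' ' p hv
    by_cases hne : s.toList = []
    · simp [hne, vsLead, PySem.Chars.count, PySem.Chars.count.go, hp]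
    · have hsuf : ([' '] <:+ s.toList) ↔ s.toList.getLastD ' ' = ' ' := by
        constructor
        · rintro ⟨pre, hpre⟩
          rw [← hpre]
          exact List.getLastD_concat
        · intro hg
          rw [List.getLastD_eq_getLast?, List.getLast?_eq_some_getLast hne, Option.getD_some] at hg
          refine ⟨s.toList.dropLast, ?_⟩
          rw [← hg]
          exact List.dropLast_append_getLast hne
      rw [List.getLastD_eq_getLast?] at hsuf hp
      by_cases hg : s.toList.getLast?.getD ' ' = ' '
      · have : vsLead s.toList.reverse 0 ≠ 0 := fun h0 => (h2.mp h0) (hrs.mpr (hsuf.mpr hg))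
        have hne2 : ¬ (vsLead s.toList 0 + vsLead s.toList.reverse 0 = 0) := by omega
        simp [hne2, hne, hp, hg]
      · have hz2 : vsLead s.toList.reverse 0 = 0 := h2.mpr (fun hx => hg (hsuf.mp (hrs.mp hx)))
        simp [hz1, hz2, hcnt, hne, hp, hg]
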